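-- pv_equiv track=rewrite | github.com/USERGITHUB1234567/programs | proj of algrorithm and competitive programming/qnoj/Trò chơi/trochoi.py | ngay_khong_choi
-- ===== SOURCE A (Python) =====
-- def ngay_khong_choi(N: int, K: int) -> int:
--     # day là chỉ số ngày hiện tại (bắt đầu từ 1)
--     day = 1
--
--     # Nếu có thể hoàn thành ít nhất một chu kỳ 5 ngày và K >= 10 => vô hạn
--     if N >= 10 and K >= 10:
--         return 0
--
--     # Nếu có thể thực hiện nhiều chu kỳ 5 ngày và K < 10, nhảy theo chu kỳ
--     if K < 10 and N >= 10:
--         D = 10 - K  # mất ròng mỗi chu kỳ 5 ngày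
--         # số chu kỳ liên tiếp có thể thực hiện sao cho trước mỗi chu kỳ N >= 10
--         m = (N - 10) // D + 1
--         N -= m * D
--         day += m * 5
--
--     # Mô phỏng từng ngày còn lại
--     while True:
--         if N < 2:
--             return day
--         # trừ 2 xu vào đầu ngày
--         N -= 2
--         # nếu là ngày thứ 5 của một chu kỳ, cộng K sau khi trừ
--         if day % 5 == 0:
--             N += K
--         day += 1
-- ===== SOURCE B (Python) =====
-- def ngay_khong_choi(N: int, K: int) -> int:
--     # Closed form: coins on day d are N - 2*(d-1) + K*((d-1)//5) as long as play continues;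
--     # within one 5-day cycle starting with n < 10 coins, play stops after max(0, n//2) days.
--     if N < 10:
--         return 1 + max(0, N // 2)
--     if K >= 10:
--         return 0
--     D = 10 - K                      # net loss per 5-day cycle
--     m = (N - K) // D                # full cycles completed before coins drop below 10
--     r = N - m * D                   # coins at the start of day 5*m + 1  (r < 10)
--     return 5 * m + 1 + max(0, r // 2)
-- ===== Notes on version B (the rewrite author's own statement) =====
-- stated objective: simpler
-- what changed: The day-by-day simulation loop is removed entirely: B solves the coin recurrence in closed form, computing the number of full 5-day cycles with one division and the stopping day inside the last cycle with the formula max(0, n//2).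
import Mathlib
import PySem

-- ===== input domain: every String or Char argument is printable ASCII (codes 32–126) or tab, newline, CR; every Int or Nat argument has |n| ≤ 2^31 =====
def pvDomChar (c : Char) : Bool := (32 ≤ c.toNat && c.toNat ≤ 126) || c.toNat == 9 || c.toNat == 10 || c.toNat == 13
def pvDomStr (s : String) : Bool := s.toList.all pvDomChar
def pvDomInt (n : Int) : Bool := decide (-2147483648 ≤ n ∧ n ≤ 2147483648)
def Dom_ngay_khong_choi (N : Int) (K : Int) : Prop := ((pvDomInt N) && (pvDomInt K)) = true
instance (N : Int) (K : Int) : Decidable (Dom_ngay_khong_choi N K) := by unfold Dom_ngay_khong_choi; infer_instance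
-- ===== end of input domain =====

-- B replaces A's day-by-day simulation loop with a closed-form arithmetic solution (objective: simpler).


-- ===== PORT A =====
-- the 'while True' simulation loop; fuel only makes it total (5 always suffices:
-- the loop is entered with N < 10 and then returns within at most 5 checks)
def ngayLoop (K : Int) : Nat → Int → Int → Int
  | 0, _, day => day
  | fuel + 1, N, day =>
      if N < 2 then day
      else
        let N' := N - 2
        let N'' := if PySem.Int.mod day 5 = 0 then N' + K else N'
        ngayLoop K fuel N'' (day + 1)

def ngay_khong_choi (N : Int) (K : Int) : Int :=
  if N ≥ 10 ∧ K ≥ 10 then 0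
  else
    let s : Int × Int :=
      if K < 10 ∧ N ≥ 10 then
        let D := 10 - K
        let m := PySem.Int.floordiv (N - 10) D + 1
        (N - m * D, 1 + m * 5)
      else (N, 1)
    ngayLoop K 5 s.1 s.2

-- ===== PORT B =====
def ngay_khong_choi_alt (N : Int) (K : Int) : Int :=
  if N < 10 then 1 + max 0 (PySem.Int.floordiv N 2)
  else if K ≥ 10 then 0
  else
    let D := 10 - K
    let m := PySem.Int.floordiv (N - K) D
    let r := N - m * D
    5 * m + 1 + max 0 (PySem.Int.floordiv r 2)

-- ===== PRECONDITION & SPEC =====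
def Spec_ngay_khong_choi (N : Int) (K : Int) (out : Int) : Prop := out = ngay_khong_choi_alt N K
instance (N : Int) (K : Int) (out : Int) : Decidable (Spec_ngay_khong_choi N K out) := by unfold Spec_ngay_khong_choi; infer_instance

-- ===== CLAIM (what is proved, stated in full; the proofs are below) =====
def Claim_equal_ngay_khong_choi : Prop := ∀ (N : Int) (K : Int), Dom_ngay_khong_choi N K → Spec_ngay_khong_choi N K (ngay_khong_choi N K)

-- ===== LEMMAS AND PROOFS =====

-- With n < 10 and day ≡ 1 (mod 5), the simulation returns day + max 0 (n // 2):
-- the bonus day (day % 5 = 0) is never reached because that would require n ≥ 10.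
set_option maxHeartbeats 2000000 in
lemma ngayLoop_eval (K n day : Int) (hn : n < 10) (hday : day % 5 = 1) :
    ngayLoop K 5 n day = day + max 0 (PySem.Int.floordiv n 2) := by
  rw [PySem.Int.floordiv_eq_ediv_of_pos (by norm_num : (0:Int) < 2)]
  simp only [ngayLoop, PySem.Int.mod_eq_emod_of_pos (by norm_num : (0:Int) < 5), Int.max_def]
  split_ifs <;> omega

theorem ngay_khong_choi_spec : Claim_equal_ngay_khong_choi := by
  intro N K _
  unfold Spec_ngay_khong_choi ngay_khong_choi ngay_khong_choi_alt
  by_cases hN : N < 10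
  · -- no cycle jump: loop starts at day 1 with N < 10
    have h1 : ¬ (N ≥ 10 ∧ K ≥ 10) := by omega
    have h2 : ¬ (K < 10 ∧ N ≥ 10) := by omega
    rw [if_neg h1, if_neg h2, if_pos hN]
    dsimp only
    exact ngayLoop_eval K N 1 hN (by norm_num)
  · by_cases hK : K ≥ 10
    · have h1 : N ≥ 10 ∧ K ≥ 10 := by omega
      simp [h1, hN]
    · -- cycle jump; show A's jump lands where B's closed form says
      have h1 : ¬ (N ≥ 10 ∧ K ≥ 10) := by omega
      have h2 : K < 10 ∧ N ≥ 10 := by omega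
      have hD : (0 : Int) < 10 - K := by omega
      rw [if_neg h1, if_pos h2, if_neg hN, if_neg hK]
      dsimp only
      rw [PySem.Int.floordiv_eq_ediv_of_pos hD, PySem.Int.floordiv_eq_ediv_of_pos hD]
      set D : Int := 10 - K with hDdef
      -- B's quotient equals A's quotient + 1
      have hq : (N - K) / D = (N - 10) / D + 1 := by
        have : N - K = (N - 10) + 1 * D := by rw [hDdef]; ring
        rw [this, Int.add_mul_ediv_right _ _ (by omega : D ≠ 0)]
      set q : Int := (N - 10) / D with hqdef
      -- residual coins after the jump are < 10
      have hres : N - (q + 1) * D < 10 := by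
        have hdm := Int.mul_ediv_add_emod (N - 10) D
        have hlt := Int.emod_lt_of_pos (N - 10) hD
        nlinarith [hdm, hlt]
      have hday : (1 + (q + 1) * 5) % 5 = 1 := by omega
      rw [ngayLoop_eval K (N - (q + 1) * D) (1 + (q + 1) * 5) hres hday, hq]
      ring

-- ===== VERDICT (by name: the statement is the Claim_ definition above) =====
-- (theorem ngay_khong_choi_spec is stated directly above as the only theorem)
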